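-- pv_equiv track=rewrite | github.com/cilt-uct/Brightspace-migrate-from-sakai | utils/migrate-profile.py | sanitize_profile
-- ===== SOURCE A (Python) =====
-- profile_attrib_map = {
--     'Company' : '_companyname',
--     'Address1' : 'addressline1',
--     'Address2' : 'addressline2',
--     'City' : 'city',
--     'Province' : 'stateprovinceregion',
--     'PostalCode' : 'zippostcode',
--     'Country' : 'country',
--     'HomePhone' : 'phone',
--     'University' : 'dateofbirth',
--     'Hobbies' : 'uctstudentnumber'
-- }
--
-- profile_clear_fields = [ 'Email' ]
--
-- def sanitize_profile(profile):
--
--     new_profile = profile.copy()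
--
--     for pf in profile_attrib_map.keys():
--         if pf in new_profile:
--             new_profile[pf] = None
--
--     for pf in profile_clear_fields:
--         if pf in new_profile:
--             new_profile[pf] = None
--
--     return new_profile
-- ===== SOURCE B (Python) =====
-- profile_attrib_map = {
--     'Company' : '_companyname',
--     'Address1' : 'addressline1',
--     'Address2' : 'addressline2',
--     'City' : 'city',
--     'Province' : 'stateprovinceregion',
--     'PostalCode' : 'zippostcode',
--     'Country' : 'country',
--     'HomePhone' : 'phone',
--     'University' : 'dateofbirth',
--     'Hobbies' : 'uctstudentnumber'
-- }
--
-- profile_clear_fields = [ 'Email' ]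
--
-- def sanitize_profile(profile):
--     targets = set(profile_attrib_map) | set(profile_clear_fields)
--     return {k: (None if k in targets else v) for k, v in profile.items()}
-- ===== Notes on version B (the rewrite author's own statement) =====
-- stated objective: idiomatic
-- what changed: B builds one set of target field names and produces the result with a single dict comprehension over the profile's own entries (set lookup per entry), instead of copying the dict and running two loops over the fixed field collections with a membership test into the profile.
import Mathlib
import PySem

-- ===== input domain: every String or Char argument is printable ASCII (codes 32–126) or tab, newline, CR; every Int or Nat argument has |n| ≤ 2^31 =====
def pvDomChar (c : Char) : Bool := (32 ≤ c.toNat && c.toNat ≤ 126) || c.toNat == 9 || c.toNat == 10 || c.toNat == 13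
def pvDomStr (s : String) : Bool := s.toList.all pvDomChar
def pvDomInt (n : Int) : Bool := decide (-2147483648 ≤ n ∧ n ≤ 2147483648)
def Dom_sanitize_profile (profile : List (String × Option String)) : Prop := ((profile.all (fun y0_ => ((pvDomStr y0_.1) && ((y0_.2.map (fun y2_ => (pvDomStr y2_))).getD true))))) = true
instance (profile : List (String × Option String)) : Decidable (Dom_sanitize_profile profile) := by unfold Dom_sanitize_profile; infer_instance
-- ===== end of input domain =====

-- One honest line: B replaces A's copy-then-two-fixed-loops with one pass over the
-- profile's own entries against a precomputed target set (idiomatic, same cost).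

-- ===== PORT A =====
def pvAttribKeys : List String :=
  ["Company", "Address1", "Address2", "City", "Province", "PostalCode",
   "Country", "HomePhone", "University", "Hobbies"]

def pvClearFields : List String := ["Email"]

-- new_profile = profile.copy(); for pf in keys: if pf in new_profile: new_profile[pf] = None
def sanitize_profile (profile : List (String × Option String)) : List (String × Option String) :=
  let np0 : PySem.Dict String (Option String) := PySem.Dict.mk profile
  let np1 := pvAttribKeys.foldl
    (fun d pf => if d.contains pf then d.insert pf none else d) np0
  let np2 := pvClearFields.foldl
    (fun d pf => if d.contains pf then d.insert pf none else d) np1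
  np2.items

-- ===== PORT B =====
def sanitize_profile_alt (profile : List (String × Option String)) : List (String × Option String) :=
  let targets : PySem.Set String :=
    PySem.Set.union (PySem.Set.ofList pvAttribKeys) (PySem.Set.ofList pvClearFields)
  profile.map (fun p => (p.1, if p.1 ∈ targets then none else p.2))

-- ===== PRECONDITION & SPEC =====
def Spec_sanitize_profile (profile : List (String × Option String)) (out : List (String × Option String)) : Prop := out = sanitize_profile_alt profile
instance (profile : List (String × Option String)) (out : List (String × Option String)) : Decidable (Spec_sanitize_profile profile out) := by unfold Spec_sanitize_profile; infer_instance

-- ===== CLAIM (what is proved, stated in full; the proofs are below) =====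
def Claim_equal_sanitize_profile : Prop := ∀ (profile : List (String × Option String)), Dom_sanitize_profile profile → Spec_sanitize_profile profile (sanitize_profile profile)

-- ===== LEMMAS AND PROOFS =====

-- one clearing step of A's loops rewrites the items by a key-local map
theorem pv_step_items (d : PySem.Dict String (Option String)) (k : String) :
    (if d.contains k then d.insert k none else d).items
      = d.items.map (fun p => if p.1 = k then (p.1, (none : Option String)) else p) := by
  by_cases h : d.contains k = true
  · rw [if_pos h, PySem.Dict.items_insert, if_pos h]
    apply List.map_congr_left
    intro p _
    by_cases hk : p.1 = k
    · simp [hk]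
    · simp [hk]
  · rw [if_neg h]
    have hnot : ∀ p ∈ d.items, p.1 ≠ k := by
      intro p hp hpk
      apply h
      have hm : p.1 ∈ d.keys := PySem.Dict.mem_keys_of_mem_items (d := d) hp
      rw [PySem.Dict.contains_eq_decide_mem_keys]
      simpa [hpk] using hm
    conv_lhs => rw [← List.map_id d.items]
    apply List.map_congr_left
    intro p hp
    simp [hnot p hp]

-- A's fold over a key list clears exactly the entries whose key is in the list
theorem pv_fold_items (K : List String) (d : PySem.Dict String (Option String)) :
    (K.foldl (fun d pf => if d.contains pf then d.insert pf none else d) d).items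
      = d.items.map (fun p => if p.1 ∈ K then (p.1, (none : Option String)) else p) := by
  induction K generalizing d with
  | nil =>
      simp
  | cons k K ih =>
      rw [List.foldl_cons, ih, pv_step_items, List.map_map]
      apply List.map_congr_left
      intro p _
      by_cases hk : p.1 = k
      · simp [hk]
      · by_cases hK : p.1 ∈ K <;> simp [hk, hK]

-- ===== VERDICT (by name: the statement is the Claim_ definition above) =====
theorem sanitize_profile_spec : Claim_equal_sanitize_profile := by
  intro profile _
  unfold Spec_sanitize_profile sanitize_profile sanitize_profile_alt
  simp only [pv_fold_items, List.map_map]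
  apply List.map_congr_left
  intro p _
  by_cases hA : p.1 ∈ pvAttribKeys <;> by_cases hC : p.1 ∈ pvClearFields <;>
    · have : (p.1 ∈ PySem.Set.union (PySem.Set.ofList pvAttribKeys) (PySem.Set.ofList pvClearFields))
          ↔ (p.1 ∈ pvAttribKeys ∨ p.1 ∈ pvClearFields) := by
        simp [pvAttribKeys, pvClearFields, PySem.Set.union, PySem.Set.ofList,
              PySem.Set.update, PySem.Set.add, PySem.Set.contains]
        tauto
      simp [hA, hC, this]
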